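-- pv_equiv track=rewrite | github.com/ksomemo/Competitive-programming | atcoder/abc/099/C.py | f
-- ===== SOURCE A (Python) =====
-- def f(N):
--     """
--     1: 1回
--     6^n, 9^n: n回
--
--     「ちょうど」払う
--
--     N円ちょうど払うときの最小回数
--     1円で払えばN円のときN回
--     N円以下の組合せによる最小回数
--
--     例:
--         2〜5: 2,3,4,5
--         6: 1
--         7,8: 2,3
--         9: 1
--         10〜14: 2,3,4,5
--         15: 2
--
--         15=14+1
--           =13+2
--           =12+3
--           =11+4
--           =10+5
--           = 9+6
--     """
--     x = [i for i in range(N+1)]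
--     x = [0] * (N+1)
--     x[1] = 1
--     a, b = 6, 9
--     while a <= N or b <= N:
--         if a <= N:
--             x[a] = 1
--         if b <= N:
--             x[b] = 1
--         a, b = a * 6, b * 9
--
--     return WA2(N, x)
--     return WA1(N, x)
--
-- def WA2(N, x):
--     for i in range(2, N+1):
--         m = 0
--         k = i
--         for j in range(i, 0, -1):
--             if x[j] > 0:
--                 # 払えるので、残り金額を引く
--                 c = k // j
--                 k -= c * j
--                 # 回数更新
--                 m += x[j] * c
--             if k == 0:
--                 break
--         x[i] = m
--
--     ans = x[N]
--     return ans
--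
-- def WA1(N, x):
--     e = N
--     ans = 0
--     for y, ok in list(enumerate(x))[::-1]:
--         if ok:
--             c = e // y
--             ans += c
--             e -= c * y
--             if N == 0:
--                 break
--
--     return ans
-- ===== SOURCE B (Python) =====
-- def _largest(base, N):
--     # largest power of `base` (at least base**0 == 1) not exceeding N
--     p = 1
--     while p * base <= N:
--         p *= base
--     return p
--
-- def f(N):
--     return N + 1 - max(_largest(6, N), _largest(9, N))
-- ===== Notes on version B (the rewrite author's own statement) =====
-- stated objective: faster
-- what changed: Replaced the O(N^2) DP table (whose greedy inner loop in fact collapses to x[i]=x[i-1]+1 except at exact powers of 6/9) by the closed form N + 1 - (largest power of 6 or 9, or 1, that is <= N), computed with two O(log N) loops.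
-- outside the precondition, e.g. on f(0): A raises IndexError, B returns 0; on f(-2): A raises IndexError, B returns -2
import Mathlib
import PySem

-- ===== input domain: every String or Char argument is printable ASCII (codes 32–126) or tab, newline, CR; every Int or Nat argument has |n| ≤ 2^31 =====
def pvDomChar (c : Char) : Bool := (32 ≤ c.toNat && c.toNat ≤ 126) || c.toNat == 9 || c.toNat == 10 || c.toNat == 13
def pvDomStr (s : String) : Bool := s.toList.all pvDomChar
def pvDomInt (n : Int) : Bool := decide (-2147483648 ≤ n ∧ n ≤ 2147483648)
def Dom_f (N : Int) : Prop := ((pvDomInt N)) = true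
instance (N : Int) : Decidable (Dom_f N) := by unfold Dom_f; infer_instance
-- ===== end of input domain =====

-- B replaces A's O(N^2) DP table by the closed form N + 1 - (largest power of 6 or 9, or 1, ≤ N).

-- ===== PORT A =====
-- inner greedy loop of WA2 (j runs over range(i, 0, -1), with the break on k == 0)
def pvInner (x : List Int) : Int → Int → List Int → Int
  | m, _, [] => m
  | m, k, j :: rest =>
    let p := if 0 < PySem.List.pyGetD x j 0 then
        let c := PySem.Int.floordiv k j
        (m + PySem.List.pyGetD x j 0 * c, k - c * j)
      else (m, k)
    if p.2 = 0 then p.1 else pvInner x p.1 p.2 rest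

-- the `while a <= N or b <= N` marking loop; fuel N.toNat + 1 exceeds the iteration count
def pvMark (N : Int) : Nat → List Int → Int → Int → List Int
  | 0, x, _, _ => x
  | fuel+1, x, a, b =>
    if a ≤ N ∨ b ≤ N then
      let x1 := if a ≤ N then PySem.List.pySetD x a 1 else x
      let x2 := if b ≤ N then PySem.List.pySetD x1 b 1 else x1
      pvMark N fuel x2 (a * 6) (b * 9)
    else x

def pvWA2 (N : Int) (x : List Int) : Int :=
  let x := (PySem.List.pyRange 2 (N+1) 1).foldl
    (fun x i => PySem.List.pySetD x i (pvInner x 0 i (PySem.List.pyRange i 0 (-1)))) x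
  PySem.List.pyGetD x N 0

def f (N : Int) : Int :=
  let _dead := PySem.List.pyRange 0 (N+1) 1      -- A's dead first assignment to x
  let x := List.replicate (N+1).toNat 0          -- x = [0] * (N+1)
  let x := PySem.List.pySetD x 1 1               -- A's write to index one (IndexError when N ≤ 0; excluded by Pre_f)
  let x := pvMark N (N.toNat + 1) x 6 9
  pvWA2 N x

-- ===== PORT B =====
-- largest power of `base` (at least base^0 = 1) not exceeding N; fuel N.toNat + 1 exceeds the iteration count
def pvLargest (N : Int) : Nat → Int → Int → Int
  | 0, _, p => p
  | fuel+1, base, p => if p * base ≤ N then pvLargest N fuel base (p * base) else p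

def f_alt (N : Int) : Int :=
  N + 1 - max (pvLargest N (N.toNat + 1) 6 1) (pvLargest N (N.toNat + 1) 9 1)

-- ===== PRECONDITION & SPEC =====
-- A assigns to index one of a list of length max(0, N+1): it raises IndexError for every N ≤ 0.
def Pre_f (N : Int) : Prop := 1 ≤ N
instance (N : Int) : Decidable (Pre_f N) := by unfold Pre_f; infer_instance
def pvWitness_f : Int := 7
def Spec_f (N : Int) (out : Int) : Prop := out = f_alt N
instance (N : Int) (out : Int) : Decidable (Spec_f N out) := by unfold Spec_f; infer_instance

-- ===== CLAIM (what is proved, stated in full; the proofs are below) =====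
def Claim_equal_f : Prop := ∀ (N : Int), Dom_f N → Pre_f N → Spec_f N (f N)

-- ===== LEMMAS AND PROOFS =====

-- abbreviation used only in the proofs
def pvBest (N : Int) : Int := max (pvLargest N (N.toNat + 1) 6 1) (pvLargest N (N.toNat + 1) 9 1)

-- "i is a power 6^k or 9^k with k ≥ 1" (the values A's marking loop writes)
def pvP (j : Int) : Prop := ∃ k : Nat, 1 ≤ k ∧ (j = 6 ^ k ∨ j = 9 ^ k)

theorem pv_falt_eq (N : Int) : f_alt N = N + 1 - pvBest N := rfl

theorem pv_getD_set_self (x : List Int) (n : Nat) (v : Int) (h : n < x.length) :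
    (x.set n v).getD n 0 = v := by
  simp [List.getD_eq_getElem?_getD, h]

theorem pv_getD_set_ne (x : List Int) (n m : Nat) (v : Int) (h : n ≠ m) :
    (x.set n v).getD m 0 = x.getD m 0 := by
  simp [List.getD_eq_getElem?_getD, List.getElem?_set_ne h]

theorem pv_pow6_ne_pow9 (k l : Nat) (hk : 1 ≤ k) : (6:Int) ^ k ≠ 9 ^ l := by
  intro h
  have he : Even ((6:Int) ^ k) := (Int.even_pow).mpr ⟨by decide, by omega⟩
  have ho : Odd ((9:Int) ^ l) := Odd.pow ⟨4, by ring⟩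
  rw [h] at he
  exact (Int.not_odd_iff_even.mpr he) ho

theorem pv_one_le_pow (b : Int) (hb : 1 ≤ b) (k : Nat) : 1 ≤ b ^ k := one_le_pow₀ hb

theorem pv_pow_mono (b : Int) (hb : 1 ≤ b) {s k : Nat} (h : s ≤ k) : b ^ s ≤ b ^ k :=
  pow_le_pow_right₀ hb h

theorem pv_pow69 (k : Nat) : (6:Int) ^ k ≤ 9 ^ k :=
  pow_le_pow_left₀ (by norm_num) (by norm_num) k

-- unique power bracket: b^a ≤ N < b^(a+1) determines a
theorem pv_pow_uniq (b : Int) (hb : 2 ≤ b) {a c : Nat} {N : Int}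
    (h1 : b ^ a ≤ N) (h2 : N < b ^ (a+1)) (h3 : b ^ c ≤ N) (h4 : N < b ^ (c+1)) : a = c := by
  by_contra hne
  rcases Nat.lt_or_ge a c with h | h
  · have : b ^ (a+1) ≤ b ^ c := pv_pow_mono b (by omega) (by omega)
    omega
  · have hac : c < a := by omega
    have : b ^ (c+1) ≤ b ^ a := pv_pow_mono b (by omega) (by omega)
    omega

theorem pv_largest_char (N base : Int) (hb : 2 ≤ base) :
    ∀ (fuel : Nat) (p : Int), 1 ≤ p → p ≤ N → N < p * base ^ fuel →
    ∃ k : Nat, pvLargest N fuel base p = p * base ^ k ∧ p * base ^ k ≤ N ∧ N < p * base ^ k * base := by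
  intro fuel
  induction fuel with
  | zero => intro p hp hpN hlt; simp at hlt; omega
  | succ fuel ih =>
    intro p hp hpN hlt
    by_cases h : p * base ≤ N
    · have hp' : 1 ≤ p * base := by nlinarith
      have hlt' : N < (p * base) * base ^ fuel := by
        have : p * base ^ (fuel+1) = (p * base) * base ^ fuel := by ring
        omega
      obtain ⟨k, hk1, hk2, hk3⟩ := ih (p * base) hp' h hlt'
      refine ⟨k + 1, ?_, ?_, ?_⟩
      · simp [pvLargest, h, hk1]; ring
      · have : p * base ^ (k+1) = p * base * base ^ k := by ring
        omega
      · have : p * base ^ (k+1) * base = p * base * base ^ k * base := by ring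
        omega
    · exact ⟨0, by simp [pvLargest, h], by simpa using hpN, by simp; omega⟩

theorem pv_lt_pow (b : Int) (hb : 2 ≤ b) (n : Nat) : (n : Int) < b ^ n := by
  induction n with
  | zero => simp
  | succ n ih =>
    have h1 : 1 ≤ b ^ n := pv_one_le_pow b (by omega) n
    have h2 : b ^ (n+1) = b ^ n * b := by ring
    push_cast
    nlinarith

theorem pv_largest_spec (N base : Int) (hb : 2 ≤ base) (hN : 1 ≤ N) :
    ∃ k : Nat, pvLargest N (N.toNat + 1) base 1 = base ^ k ∧ base ^ k ≤ N ∧ N < base ^ (k+1) := by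
  have hfuel : N < 1 * base ^ (N.toNat + 1) := by
    have h1 : ((N.toNat : Int)) < base ^ N.toNat := pv_lt_pow base hb N.toNat
    have h2 : base ^ N.toNat ≤ base ^ (N.toNat + 1) := pv_pow_mono base (by omega) (Nat.le_succ _)
    rw [one_mul]
    omega
  obtain ⟨k, h1, h2, h3⟩ := pv_largest_char N base hb (N.toNat + 1) 1 le_rfl hN hfuel
  exact ⟨k, by simpa using h1, by simpa using h2, by rw [pow_succ]; simpa using h3⟩

-- pvBest facts
theorem pv_best_bounds (N : Int) (hN : 1 ≤ N) : 1 ≤ pvBest N ∧ pvBest N ≤ N := by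
  obtain ⟨k6, e6, l6, u6⟩ := pv_largest_spec N 6 (by norm_num) hN
  obtain ⟨k9, e9, l9, u9⟩ := pv_largest_spec N 9 (by norm_num) hN
  have := pv_one_le_pow 6 (by norm_num) k6
  have := pv_one_le_pow 9 (by norm_num) k9
  unfold pvBest
  rw [e6, e9]
  constructor
  · exact le_max_of_le_left ‹1 ≤ (6:Int) ^ k6›
  · exact max_le l6 l9

theorem pv_best_one : pvBest 1 = 1 := by decide

theorem pv_best_pow (i : Int) (hi : 1 ≤ i) (hp : pvP i) : pvBest i = i := by
  obtain ⟨k, hk, hcase⟩ := hp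
  obtain ⟨k6, e6, l6, u6⟩ := pv_largest_spec i 6 (by norm_num) hi
  obtain ⟨k9, e9, l9, u9⟩ := pv_largest_spec i 9 (by norm_num) hi
  unfold pvBest
  rw [e6, e9]
  rcases hcase with h | h
  · have hself : (6:Int) ^ k ≤ i := le_of_eq h.symm
    have hup : i < 6 ^ (k+1) := by
      rw [h, pow_succ]
      have := pv_one_le_pow 6 (by norm_num) k
      nlinarith
    have : k6 = k := pv_pow_uniq 6 (by norm_num) l6 u6 hself hup
    subst this
    rw [← h]
    exact max_eq_left (by omega)
  · have hself : (9:Int) ^ k ≤ i := le_of_eq h.symm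
    have hup : i < 9 ^ (k+1) := by
      rw [h, pow_succ]
      have := pv_one_le_pow 9 (by norm_num) k
      nlinarith
    have : k9 = k := pv_pow_uniq 9 (by norm_num) l9 u9 hself hup
    subst this
    rw [← h]
    exact max_eq_right (by omega)

theorem pv_best_step (i : Int) (hi : 2 ≤ i) (hp : ¬ pvP i) : pvBest i = pvBest (i-1) := by
  obtain ⟨a6, e6, l6, u6⟩ := pv_largest_spec i 6 (by norm_num) (by omega)
  obtain ⟨a9, e9, l9, u9⟩ := pv_largest_spec i 9 (by norm_num) (by omega)
  obtain ⟨b6, e6', l6', u6'⟩ := pv_largest_spec (i-1) 6 (by norm_num) (by omega)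
  obtain ⟨b9, e9', l9', u9'⟩ := pv_largest_spec (i-1) 9 (by norm_num) (by omega)
  have hne6 : (6:Int) ^ a6 ≠ i := by
    intro h
    rcases Nat.eq_zero_or_pos a6 with h0 | h0
    · subst h0; simp at h; omega
    · exact hp ⟨a6, h0, Or.inl h.symm⟩
  have hne9 : (9:Int) ^ a9 ≠ i := by
    intro h
    rcases Nat.eq_zero_or_pos a9 with h0 | h0
    · subst h0; simp at h; omega
    · exact hp ⟨a9, h0, Or.inr h.symm⟩
  have h6 : a6 = b6 := pv_pow_uniq 6 (by norm_num) (by omega) (by omega) l6' u6'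
  have h9 : a9 = b9 := pv_pow_uniq 9 (by norm_num) (by omega) (by omega) l9' u9'
  unfold pvBest
  rw [e6, e9, e6', e9', h6, h9]

-- ===== A-side =====

theorem pv_mark_length (N : Int) : ∀ (fuel : Nat) (x : List Int) (a b : Int),
    (pvMark N fuel x a b).length = x.length := by
  intro fuel
  induction fuel with
  | zero => intro x a b; rfl
  | succ fuel ih =>
    intro x a b
    simp only [pvMark]
    split_ifs <;> simp [ih, PySem.List.length_pySetD]

theorem pv_pow_lt (b : Int) (hb : 2 ≤ b) {s k : Nat} (h : s < k) : b ^ s < b ^ k := by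
  have h1 : b ^ (s+1) ≤ b ^ k := pv_pow_mono b (by omega) h
  have h2 : b ^ (s+1) = b ^ s * b := by ring
  have h3 : 1 ≤ b ^ s := pv_one_le_pow b (by omega) s
  nlinarith

theorem pv_toNat_lt (a b : Int) (h0 : 0 ≤ a) (h : a ≤ b) : a.toNat < (b+1).toNat := by
  omega

theorem pv_setD_getD (y : List Int) (v j : Int) (hv0 : 0 ≤ v) (hj0 : 0 ≤ j)
    (hvlen : v.toNat < y.length) :
    (PySem.List.pySetD y v 1).getD j.toNat 0 = if j = v then 1 else y.getD j.toNat 0 := by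
  rw [PySem.List.pySetD_of_nonneg _ _ hv0]
  split_ifs with h
  · subst h; exact pv_getD_set_self y j.toNat 1 hvlen
  · exact pv_getD_set_ne y v.toNat j.toNat 1 (by omega)

theorem pv_mark_getD (N : Int) (hN : 1 ≤ N) :
    ∀ (fuel s : Nat) (x : List Int), 1 ≤ s → x.length = (N+1).toNat → N < 6 ^ (s + fuel) →
    ∀ j : Int, 0 ≤ j → j ≤ N →
    ((∃ k : Nat, s ≤ k ∧ (j = 6 ^ k ∨ j = 9 ^ k)) →
        (pvMark N fuel x (6 ^ s) (9 ^ s)).getD j.toNat 0 = 1) ∧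
    (¬ (∃ k : Nat, s ≤ k ∧ (j = 6 ^ k ∨ j = 9 ^ k)) →
        (pvMark N fuel x (6 ^ s) (9 ^ s)).getD j.toNat 0 = x.getD j.toNat 0) := by
  intro fuel
  induction fuel with
  | zero =>
    intro s x hs hlen hflt j hj0 hjN
    constructor
    · rintro ⟨k, hk, hcase⟩
      exfalso
      have h6 : (6:Int) ^ s ≤ 6 ^ k := pv_pow_mono 6 (by norm_num) hk
      have h9 : (6:Int) ^ k ≤ 9 ^ k := pv_pow69 k
      simp only [Nat.add_zero] at hflt
      rcases hcase with h | h <;> omega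
    · intro _; rfl
  | succ fuel ih =>
    intro s x hs hlen hflt j hj0 hjN
    simp only [pvMark]
    by_cases hcond : (6:Int) ^ s ≤ N ∨ (9:Int) ^ s ≤ N
    · rw [if_pos hcond]
      have e6 : (6:Int) ^ s * 6 = 6 ^ (s+1) := by rw [pow_succ]
      have e9 : (9:Int) ^ s * 9 = 9 ^ (s+1) := by rw [pow_succ]
      rw [e6, e9]
      set x1 := if (6:Int) ^ s ≤ N then PySem.List.pySetD x (6 ^ s) 1 else x with hx1
      set x2 := if (9:Int) ^ s ≤ N then PySem.List.pySetD x1 (9 ^ s) 1 else x1 with hx2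
      have hlen1 : x1.length = (N+1).toNat := by
        rw [hx1]; split_ifs <;> simp [PySem.List.length_pySetD, hlen]
      have hlen2 : x2.length = (N+1).toNat := by
        rw [hx2]; split_ifs <;> simp [PySem.List.length_pySetD, hlen1]
      have hflt' : N < 6 ^ (s + 1 + fuel) := by
        have he : s + 1 + fuel = s + (fuel + 1) := by omega
        rw [he]; exact hflt
      have hpos6 : (0:Int) ≤ 6 ^ s := by positivity
      have hpos9 : (0:Int) ≤ 9 ^ s := by positivity
      have IH := ih (s+1) x2 (by omega) hlen2 hflt' j hj0 hjN
      have h69 : (6:Int) ^ s ≠ 9 ^ s := pv_pow6_ne_pow9 s s hs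
      constructor
      · rintro ⟨k, hk, hcase⟩
        by_cases hk1 : s + 1 ≤ k
        · exact IH.1 ⟨k, hk1, hcase⟩
        · have hks : k = s := by omega
          rw [hks] at hcase
          have hno : ¬ (∃ k' : Nat, s + 1 ≤ k' ∧ (j = 6 ^ k' ∨ j = 9 ^ k')) := by
            rintro ⟨k', hk', hc'⟩
            have hl6 : (6:Int) ^ s < 6 ^ k' := pv_pow_lt 6 (by norm_num) (by omega)
            have hl9 : (9:Int) ^ s < 9 ^ k' := pv_pow_lt 9 (by norm_num) (by omega)
            have hp1 : (6:Int) ^ s ≠ 9 ^ k' := pv_pow6_ne_pow9 s k' hs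
            have hp2 : (6:Int) ^ k' ≠ 9 ^ s := pv_pow6_ne_pow9 k' s (by omega)
            rcases hcase with h | h <;> rcases hc' with h' | h'
            · exact hl6.ne (h.symm.trans h')
            · exact hp1 (h.symm.trans h')
            · exact hp2 (h'.symm.trans h)
            · exact hl9.ne (h.symm.trans h')
          rw [IH.2 hno]
          rcases hcase with h | h
          · have h6N : (6:Int) ^ s ≤ N := by rw [← h]; exact hjN
            have hg1 : x1.getD j.toNat 0 = 1 := by
              rw [hx1, if_pos h6N,
                pv_setD_getD x (6 ^ s) j hpos6 hj0 (by rw [hlen]; exact pv_toNat_lt _ _ hpos6 h6N), if_pos h]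
            rw [hx2]
            split_ifs with h9N
            · rw [pv_setD_getD x1 (9 ^ s) j hpos9 hj0 (by rw [hlen1]; exact pv_toNat_lt _ _ hpos9 h9N),
                if_neg (by rw [h]; exact h69)]
              exact hg1
            · exact hg1
          · have h9N : (9:Int) ^ s ≤ N := by rw [← h]; exact hjN
            rw [hx2, if_pos h9N,
              pv_setD_getD x1 (9 ^ s) j hpos9 hj0 (by rw [hlen1]; exact pv_toNat_lt _ _ hpos9 h9N), if_pos h]
      · intro hno
        have hno' : ¬ (∃ k' : Nat, s + 1 ≤ k' ∧ (j = 6 ^ k' ∨ j = 9 ^ k')) := by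
          rintro ⟨k', hk', hc'⟩
          exact hno ⟨k', by omega, hc'⟩
        have hj6 : j ≠ 6 ^ s := fun h => hno ⟨s, le_rfl, Or.inl h⟩
        have hj9 : j ≠ 9 ^ s := fun h => hno ⟨s, le_rfl, Or.inr h⟩
        rw [IH.2 hno']
        have hg1 : x1.getD j.toNat 0 = x.getD j.toNat 0 := by
          rw [hx1]
          split_ifs with h6N
          · rw [pv_setD_getD x (6 ^ s) j hpos6 hj0 (by rw [hlen]; exact pv_toNat_lt _ _ hpos6 h6N), if_neg hj6]
          · rfl
        rw [hx2]
        split_ifs with h9N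
        · rw [pv_setD_getD x1 (9 ^ s) j hpos9 hj0 (by rw [hlen1]; exact pv_toNat_lt _ _ hpos9 h9N), if_neg hj9]
          exact hg1
        · exact hg1
    · rw [if_neg hcond]
      push_neg at hcond
      constructor
      · rintro ⟨k, hk, hcase⟩
        exfalso
        have h6 : (6:Int) ^ s ≤ 6 ^ k := pv_pow_mono 6 (by norm_num) hk
        have h9 : (9:Int) ^ s ≤ 9 ^ k := pv_pow_mono 9 (by norm_num) hk
        rcases hcase with h | h <;> omega
      · intro _; rfl

def pvStep (x : List Int) (i : Int) : List Int :=
  PySem.List.pySetD x i (pvInner x 0 i (PySem.List.pyRange i 0 (-1)))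

def pvGood (N M : Int) (x : List Int) : Prop :=
  x.length = (N+1).toNat ∧
  (∀ j : Int, 1 ≤ j → j ≤ M → x.getD j.toNat 0 = j + 1 - pvBest j) ∧
  (∀ j : Int, M < j → j ≤ N →
    (pvP j → x.getD j.toNat 0 = 1) ∧ (¬ pvP j → x.getD j.toNat 0 = 0))

theorem pv_getD_replicate (n m : Nat) : (List.replicate n (0:Int)).getD m 0 = 0 := by
  simp [List.getD_eq_getElem?_getD, List.getElem?_replicate]
  split_ifs <;> rfl

theorem pv_inner_cons_pos (x : List Int) (m k j : Int) (rest : List Int)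
    (h : 0 < PySem.List.pyGetD x j 0) :
    pvInner x m k (j :: rest) =
      (if k - PySem.Int.floordiv k j * j = 0 then m + PySem.List.pyGetD x j 0 * PySem.Int.floordiv k j
       else pvInner x (m + PySem.List.pyGetD x j 0 * PySem.Int.floordiv k j)
              (k - PySem.Int.floordiv k j * j) rest) := by
  simp only [pvInner, if_pos h]

theorem pv_inner_cons_neg (x : List Int) (m k j : Int) (rest : List Int)
    (h : ¬ 0 < PySem.List.pyGetD x j 0) :
    pvInner x m k (j :: rest) = (if k = 0 then m else pvInner x m k rest) := by
  simp only [pvInner, if_neg h]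

theorem pv_x0_good (N : Int) (hN : 1 ≤ N) :
    pvGood N 1 (pvMark N (N.toNat + 1)
      (PySem.List.pySetD (List.replicate (N+1).toNat 0) 1 1) 6 9) := by
  have hlenI : (PySem.List.pySetD (List.replicate (N+1).toNat (0:Int)) 1 1).length = (N+1).toNat := by
    simp [PySem.List.length_pySetD]
  have hgetI : ∀ j : Int, 0 ≤ j →
      (PySem.List.pySetD (List.replicate (N+1).toNat (0:Int)) 1 1).getD j.toNat 0 =
        if j = 1 then 1 else 0 := by
    intro j hj
    rw [pv_setD_getD _ 1 j (by norm_num) hj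
      (by simp [List.length_replicate]; omega)]
    split_ifs with h
    · rfl
    · exact pv_getD_replicate _ _
  have hflt : N < 6 ^ (1 + (N.toNat + 1)) := by
    have h1 : ((N.toNat:Int)) < 6 ^ N.toNat := pv_lt_pow 6 (by norm_num) N.toNat
    have h2 : (6:Int) ^ N.toNat ≤ 6 ^ (1 + (N.toNat + 1)) := pv_pow_mono 6 (by norm_num) (by omega)
    omega
  have hm := pv_mark_getD N hN (N.toNat + 1) 1 _ le_rfl hlenI hflt
  have e6 : ((6:Int) ^ (1:Nat)) = 6 := by norm_num
  have e9 : ((9:Int) ^ (1:Nat)) = 9 := by norm_num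
  rw [e6, e9] at hm
  refine ⟨?_, ?_, ?_⟩
  · rw [pv_mark_length, hlenI]
  · intro j hj1 hj2
    have hj : j = 1 := by omega
    subst hj
    have hno : ¬ (∃ k : Nat, 1 ≤ k ∧ ((1:Int) = 6 ^ k ∨ (1:Int) = 9 ^ k)) := by
      rintro ⟨k, hk, h | h⟩
      · have : (6:Int) ^ 1 ≤ 6 ^ k := pv_pow_mono 6 (by norm_num) hk
        norm_num at this; omega
      · have : (9:Int) ^ 1 ≤ 9 ^ k := pv_pow_mono 9 (by norm_num) hk
        norm_num at this; omega
    rw [(hm 1 (by norm_num) hN).2 hno, hgetI 1 (by norm_num), if_pos rfl, pv_best_one]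
    norm_num
  · intro j hj1 hj2
    constructor
    · intro hP
      exact (hm j (by omega) hj2).1 hP
    · intro hP
      rw [(hm j (by omega) hj2).2 hP, hgetI j (by omega), if_neg (by omega)]

theorem pv_inner_middle (x : List Int) (hx1 : x.getD 1 0 = 1) :
    ∀ (n : Nat), 1 ≤ n → ∀ (m : Int),
      pvInner x m 1 (PySem.List.pyRange ((n:Nat):Int) 0 (-1)) = m + 1 := by
  intro n
  induction n with
  | zero => intro h m; exact absurd h (by decide)
  | succ n ih =>
    intro _ m
    rcases Nat.eq_zero_or_pos n with h0 | h0
    · subst h0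
      rw [show (((0+1:Nat)):Int) = 1 by norm_num]
      rw [PySem.List.pyRange_neg_one_cons (by norm_num),
        PySem.List.pyRange_neg_one_eq_nil (by norm_num)]
      have hg : PySem.List.pyGetD x (1:Int) 0 = 1 := by
        rw [PySem.List.pyGetD_of_nonneg _ _ (by norm_num)]
        simpa using hx1
      rw [pv_inner_cons_pos _ _ _ _ _ (by rw [hg]; norm_num)]
      have hc : PySem.Int.floordiv 1 1 = 1 := by
        rw [PySem.Int.floordiv_eq_ediv_of_pos (by norm_num)]; norm_num
      rw [hg, hc]
      norm_num
    · have hcast : (((n+1:Nat)):Int) = (n:Int) + 1 := by push_cast; ring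
      rw [hcast, PySem.List.pyRange_neg_one_cons (by positivity)]
      rw [show ((n:Int) + 1) - 1 = (n:Int) by ring]
      have hc : PySem.Int.floordiv 1 ((n:Int)+1) = 0 := by
        rw [PySem.Int.floordiv_eq_iff_of_pos (by positivity)]
        constructor
        · omega
        · have : (1:Int) ≤ (n:Int) := by exact_mod_cast h0
          nlinarith
      by_cases hpos : 0 < PySem.List.pyGetD x ((n:Int)+1) 0
      · rw [pv_inner_cons_pos _ _ _ _ _ hpos, hc]
        norm_num
        exact ih h0 m
      · rw [pv_inner_cons_neg _ _ _ _ _ hpos]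
        norm_num
        exact ih h0 m

theorem pv_inner_result (N i : Int) (x : List Int) (h2 : 2 ≤ i) (hiN : i ≤ N)
    (hxiP : pvP i → x.getD i.toNat 0 = 1) (hxiN : ¬ pvP i → x.getD i.toNat 0 = 0)
    (hlow : ∀ j : Int, 1 ≤ j → j < i → x.getD j.toNat 0 = j + 1 - pvBest j) :
    pvInner x 0 i (PySem.List.pyRange i 0 (-1)) = i + 1 - pvBest i := by
  have hgi : PySem.List.pyGetD x i 0 = x.getD i.toNat 0 :=
    PySem.List.pyGetD_of_nonneg _ _ (by omega)
  rw [PySem.List.pyRange_neg_one_cons (by omega)]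
  by_cases hP : pvP i
  · rw [pv_inner_cons_pos _ _ _ _ _ (by rw [hgi, hxiP hP]; norm_num)]
    have hc : PySem.Int.floordiv i i = 1 := by
      rw [PySem.Int.floordiv_eq_iff_of_pos (by omega)]
      constructor <;> nlinarith
    rw [hgi, hxiP hP, hc, pv_best_pow i (by omega) hP]
    rw [show i - 1 * i = (0:Int) by ring, if_pos rfl]
    ring
  · rw [pv_inner_cons_neg _ _ _ _ _ (by rw [hgi, hxiN hP]; norm_num)]
    rw [if_neg (by omega)]
    have hbs : pvBest i = pvBest (i-1) := pv_best_step i h2 hP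
    by_cases hi2 : i = 2
    · subst hi2
      rw [show (2:Int) - 1 = 1 by norm_num, PySem.List.pyRange_neg_one_cons (by norm_num),
        PySem.List.pyRange_neg_one_eq_nil (by norm_num)]
      have hx1 : x.getD 1 0 = 1 := by
        have h := hlow 1 (by norm_num) (by norm_num)
        norm_num [pv_best_one] at h
        simpa using h
      have hg1 : PySem.List.pyGetD x (1:Int) 0 = 1 := by
        rw [PySem.List.pyGetD_of_nonneg _ _ (by norm_num)]
        simpa using hx1
      rw [pv_inner_cons_pos _ _ _ _ _ (by rw [hg1]; norm_num)]
      have hc : PySem.Int.floordiv 2 1 = 2 := by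
        rw [PySem.Int.floordiv_eq_ediv_of_pos (by norm_num)]; norm_num
      rw [hg1, hc, hbs]
      norm_num [pv_best_one]
    · have hi3 : 3 ≤ i := by omega
      rw [PySem.List.pyRange_neg_one_cons (by omega)]
      have hv : x.getD (i-1).toNat 0 = i - pvBest (i-1) := by
        have h := hlow (i-1) (by omega) (by omega)
        rw [h]; ring
      have hg : PySem.List.pyGetD x (i-1) 0 = i - pvBest (i-1) := by
        rw [PySem.List.pyGetD_of_nonneg _ _ (by omega), hv]
      have hbpos := pv_best_bounds (i-1) (by omega)
      rw [pv_inner_cons_pos _ _ _ _ _ (by rw [hg]; omega)]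
      have hc : PySem.Int.floordiv i (i-1) = 1 := by
        rw [PySem.Int.floordiv_eq_iff_of_pos (by omega)]
        constructor <;> nlinarith
      rw [hg, hc]
      rw [show i - 1 * (i-1) = (1:Int) by ring, if_neg (by norm_num)]
      rw [show (0:Int) + (i - pvBest (i-1)) * 1 = i - pvBest (i-1) by ring]
      have hx1 : x.getD 1 0 = 1 := by
        have h := hlow 1 (by norm_num) (by omega)
        norm_num [pv_best_one] at h
        simpa using h
      have hmid := pv_inner_middle x hx1 (i-2).toNat (by omega) (i - pvBest (i-1))
      rw [show (((i-2).toNat:Nat):Int) = i - 2 by omega] at hmid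
      rw [show i - 1 - 1 = i - 2 by ring, hmid, hbs]
      ring

theorem pv_fold_good (N : Int) (x0 : List Int) (h0 : pvGood N 1 x0) :
    ∀ (t : Nat), 1 + (t:Int) ≤ N →
      pvGood N (1 + (t:Int)) ((PySem.List.pyRange 2 (1 + (t:Int) + 1) 1).foldl pvStep x0) := by
  intro t
  induction t with
  | zero =>
    intro _
    rw [show (1:Int) + ((0:Nat):Int) + 1 = 2 by norm_num,
      PySem.List.pyRange_one_eq_nil (by norm_num)]
    simpa using h0
  | succ t ih =>
    intro hle
    have hc1 : (1:Int) + ((t+1:Nat):Int) = (1 + (t:Int)) + 1 := by push_cast; ring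
    rw [hc1]
    have hy := ih (by push_cast at hle; omega)
    rw [show (1 + (t:Int)) + 1 + 1 = ((1 + (t:Int)) + 1) + 1 by ring,
      PySem.List.pyRange_one_succ_right (by omega), List.foldl_append]
    obtain ⟨hyl, hylow, hyhigh⟩ := hy
    set y := (PySem.List.pyRange 2 (1 + (t:Int) + 1) 1).foldl pvStep x0 with hy
    set M : Int := 1 + (t:Int) + 1 with hM
    have hM2 : 2 ≤ M := by rw [hM]; push_cast; omega
    have hMN : M ≤ N := by rw [hM]; omega
    have hMhigh := hyhigh M (by rw [hM]; omega) hMN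
    have hinner : pvInner y 0 M (PySem.List.pyRange M 0 (-1)) = M + 1 - pvBest M :=
      pv_inner_result N M y hM2 hMN hMhigh.1 hMhigh.2
        (fun j hj1 hj2 => hylow j hj1 (by omega))
    simp only [List.foldl_cons, List.foldl_nil]
    rw [show pvStep y M = PySem.List.pySetD y M (pvInner y 0 M (PySem.List.pyRange M 0 (-1))) from rfl]
    rw [hinner, PySem.List.pySetD_of_nonneg _ _ (by omega)]
    refine ⟨?_, ?_, ?_⟩
    · rw [List.length_set, hyl]
    · intro j hj1 hj2
      by_cases hjM : j = M
      · subst hjM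
        rw [pv_getD_set_self _ _ _ (by rw [hyl]; exact pv_toNat_lt _ _ (by omega) hMN)]
      · rw [pv_getD_set_ne _ _ _ _ (by omega)]
        exact hylow j hj1 (by omega)
    · intro j hj1 hj2
      constructor
      · intro hP
        rw [pv_getD_set_ne _ _ _ _ (by omega)]
        exact (hyhigh j (by omega) hj2).1 hP
      · intro hP
        rw [pv_getD_set_ne _ _ _ _ (by omega)]
        exact (hyhigh j (by omega) hj2).2 hP

theorem pv_spec : ∀ (N : Int), 1 ≤ N → f N = N + 1 - pvBest N := by
  intro N hN
  unfold f pvWA2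
  dsimp only
  rw [show (fun (x : List Int) (i : Int) =>
      PySem.List.pySetD x i (pvInner x 0 i (PySem.List.pyRange i 0 (-1)))) = pvStep from rfl]
  have h0 := pv_x0_good N hN
  have hg := pv_fold_good N _ h0 (N-1).toNat (by omega)
  rw [show (1:Int) + ((N-1).toNat:Int) = N by omega] at hg
  rw [PySem.List.pyGetD_of_nonneg _ _ (by omega)]
  exact hg.2.1 N hN le_rfl

-- ===== VERDICT (by name: the statement is the Claim_ definition above) =====
theorem f_spec : Claim_equal_f := by
  intro N _ hPre
  unfold Spec_f
  rw [pv_spec N hPre, pv_falt_eq]
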